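-- pv_equiv track=rewrite | github.com/Alekseyyy/ctfs | programming/codesignal/tourney/21Nov2020/solutions/5.py | isMAC48Address
-- ===== SOURCE A (Python) =====
-- def isMAC48Address(inputString):
--     x = inputString.split("-")
--     if len(x) != 6:
--         return False
--     for k in x:
--         for w in k:
--             if w not in ["0", "1", "2", "3", "4", "5", "6", "7", "8", "9", "A", "B", "C", "D", "E", "F"]:
--                 return False
--
--     return True
-- ===== SOURCE B (Python) =====
-- def isMAC48Address(inputString):
--     dashes = 0
--     for ch in inputString:
--         if ch == '-':
--             dashes += 1
--         elif not ('0' <= ch <= '9' or 'A' <= ch <= 'F'):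
--             return False
--     return dashes == 5
-- ===== Notes on version B (the rewrite author's own statement) =====
-- stated objective: simpler
-- what changed: Replaces the split-on-dash step plus nested segment/character loops with a 16-element membership list by a single pass over the characters that counts separators and range-checks every other character, returning True iff exactly 5 separators were seen (6 segments iff 5 separators).
import Mathlib
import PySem

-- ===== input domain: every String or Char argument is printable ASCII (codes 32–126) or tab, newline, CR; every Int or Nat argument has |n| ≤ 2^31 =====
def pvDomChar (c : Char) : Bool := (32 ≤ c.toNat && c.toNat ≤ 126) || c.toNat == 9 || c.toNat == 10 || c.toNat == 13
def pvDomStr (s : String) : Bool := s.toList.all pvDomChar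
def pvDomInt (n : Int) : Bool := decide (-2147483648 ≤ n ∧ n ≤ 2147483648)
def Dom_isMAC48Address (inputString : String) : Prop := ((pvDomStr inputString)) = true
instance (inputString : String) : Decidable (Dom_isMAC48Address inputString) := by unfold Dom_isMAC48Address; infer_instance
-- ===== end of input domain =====

-- B replaces split('-') + nested loops + a 16-element membership list by one pass that counts
-- dashes and range-checks each non-dash character; objective: simpler (same O(n) cost).

-- ===== PORT A =====
-- the Python hex-digit membership list, as chars
def hexDigits : List Char := ['0','1','2','3','4','5','6','7','8','9','A','B','C','D','E','F']

def isMAC48Address (inputString : String) : Bool :=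
  let x := PySem.Chars.splitOn inputString.toList ['-']
  if x.length ≠ 6 then false
  else x.all (fun k => k.all (fun w => hexDigits.contains w))

-- ===== PORT B =====
def isHexUp (c : Char) : Bool := ('0' ≤ c && c ≤ '9') || ('A' ≤ c && c ≤ 'F')

-- the single pass of Source B: early return False on a bad char, else count dashes
def altGo : List Char → Nat → Bool
  | [], dashes => dashes == 5
  | c :: rest, dashes =>
    if c = '-' then altGo rest (dashes + 1)
    else if isHexUp c then altGo rest dashes
    else false

def isMAC48Address_alt (inputString : String) : Bool :=
  altGo inputString.toList 0

-- ===== PRECONDITION & SPEC =====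
def Spec_isMAC48Address (inputString : String) (out : Bool) : Prop := out = isMAC48Address_alt inputString
instance (inputString : String) (out : Bool) : Decidable (Spec_isMAC48Address inputString out) := by unfold Spec_isMAC48Address; infer_instance

-- ===== CLAIM (what is proved, stated in full; the proofs are below) =====
def Claim_equal_isMAC48Address : Prop := ∀ (inputString : String), Dom_isMAC48Address inputString → Spec_isMAC48Address inputString (isMAC48Address inputString)

-- ===== LEMMAS AND PROOFS =====

-- a plain structural form of Python's str.split with separator "-"
def mySplit (pre : List Char) : List Char → List (List Char)
  | [] => [pre]
  | c :: r => if c = '-' then pre :: mySplit [] r else mySplit (pre ++ [c]) r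

theorem go_spec (l : List Char) : ∀ (fuel : Nat) (cur : List Char) (acc : List (List Char)),
    l.length ≤ fuel →
    PySem.Chars.splitOn.go ['-'] fuel l cur acc = acc.reverse ++ mySplit cur.reverse l := by
  induction l with
  | nil =>
    intro fuel cur acc h
    cases fuel <;> simp [PySem.Chars.splitOn.go, mySplit]
  | cons c r ih =>
    intro fuel cur acc h
    cases fuel with
    | zero => simp at h
    | succ f =>
      simp only [PySem.Chars.splitOn.go]
      by_cases hc : c = '-'
      · subst hc
        simp [List.isPrefixOf, ih f [] (cur.reverse :: acc) (by simpa using h), mySplit]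
      · have hp : List.isPrefixOf ['-'] (c :: r) = false := by
          simp [List.isPrefixOf]; intro h'; exact hc h'.symm
        simp [hp, ih f (c :: cur) acc (by simpa using h), mySplit, hc]

theorem splitOn_eq (l : List Char) :
    PySem.Chars.splitOn l ['-'] = mySplit [] l := by
  simpa using go_spec l (l.length + 1) [] [] (by omega)

theorem length_mySplit (l : List Char) : ∀ pre, (mySplit pre l).length = l.count '-' + 1 := by
  induction l with
  | nil => intro pre; simp [mySplit]
  | cons c r ih =>
    intro pre
    by_cases hc : c = '-' <;> simp [mySplit, hc, ih]

theorem all_mySplit (f : Char → Bool) (l : List Char) : ∀ pre,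
    (mySplit pre l).all (fun k => k.all f) =
      (pre.all f && l.all (fun c => c == '-' || f c)) := by
  induction l with
  | nil => intro pre; simp [mySplit]
  | cons c r ih =>
    intro pre
    by_cases hc : c = '-'
    · simp [mySplit, hc, ih]
    · have hcb : (c == '-') = false := by simpa using hc
      simp only [mySplit, if_neg hc, ih, List.all_append, List.all_cons, List.all_nil,
        Bool.and_true, hcb, Bool.false_or, Bool.and_assoc]

theorem hex_eq (c : Char) : hexDigits.contains c = isHexUp c := by
  have hinj : ∀ d : Char, (c = d) ↔ c.toNat = d.toNat :=
    fun d => ⟨fun h => by rw [h], fun h => Char.ext (UInt32.toNat_inj.mp h)⟩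
  have hle : ∀ d e : Char, (d ≤ e) ↔ d.toNat ≤ e.toNat := fun _ _ => Iff.rfl
  rw [Bool.eq_iff_iff]
  simp only [hexDigits, isHexUp, List.contains_eq_any_beq, List.any_eq_true, List.mem_cons,
    List.not_mem_nil, or_false, beq_iff_eq, Bool.or_eq_true, Bool.and_eq_true, decide_eq_true_eq,
    hle]
  constructor
  · rintro ⟨d, hd, rfl⟩
    rcases hd with h|h|h|h|h|h|h|h|h|h|h|h|h|h|h|h <;> subst h <;> simp [Char.toNat]
  · rintro (⟨h1, h2⟩ | ⟨h1, h2⟩) <;>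
    · refine ⟨c, ?_, rfl⟩
      simp only [hinj, show '0'.toNat = 48 from rfl, show '1'.toNat = 49 from rfl, show '2'.toNat = 50 from rfl, show '3'.toNat = 51 from rfl, show '4'.toNat = 52 from rfl, show '5'.toNat = 53 from rfl, show '6'.toNat = 54 from rfl, show '7'.toNat = 55 from rfl, show '8'.toNat = 56 from rfl, show '9'.toNat = 57 from rfl, show 'A'.toNat = 65 from rfl, show 'B'.toNat = 66 from rfl, show 'C'.toNat = 67 from rfl, show 'D'.toNat = 68 from rfl, show 'E'.toNat = 69 from rfl, show 'F'.toNat = 70 from rfl] at h1 h2 ⊢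
      omega

theorem altGo_spec (l : List Char) : ∀ dashes,
    altGo l dashes =
      (l.all (fun c => c == '-' || isHexUp c) && (dashes + l.count '-' == 5)) := by
  induction l with
  | nil => intro dashes; simp [altGo]
  | cons c r ih =>
    intro dashes
    by_cases hc : c = '-'
    · simp only [altGo, hc, if_pos, ih, List.all_cons, BEq.rfl, Bool.true_or, Bool.true_and,
        List.count_cons]
      have : dashes + 1 + List.count '-' r = dashes + (List.count '-' r + 1) := by omega
      rw [this]
    · have hcb : (c == '-') = false := by simpa using hc
      have hcnt : List.count '-' (c :: r) = List.count '-' r := by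
        simp [List.count_cons, hcb]
      by_cases hh : isHexUp c = true
      · simp [altGo, hc, hh, ih, hcb, hcnt]
      · have hhf : isHexUp c = false := Bool.eq_false_iff.mpr hh
        simp only [altGo, if_neg hc, hhf, Bool.false_eq_true, if_false, List.all_cons, hcb,
          Bool.false_or, Bool.false_and]

-- ===== VERDICT (by name: the statement is the Claim_ definition above) =====
theorem isMAC48Address_spec : Claim_equal_isMAC48Address := by
  intro s _
  unfold Spec_isMAC48Address isMAC48Address isMAC48Address_alt
  simp only [splitOn_eq, altGo_spec, length_mySplit,
    all_mySplit (fun w => hexDigits.contains w) s.toList []]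
  have hcong : (s.toList.all (fun c => c == '-' || hexDigits.contains c)) =
      (s.toList.all (fun c => c == '-' || isHexUp c)) := by
    simp only [hex_eq]
  by_cases h6 : s.toList.count '-' = 5
  · rw [if_neg (by omega)]
    have h2 : ((0 : Nat) + List.count '-' s.toList == 5) = true := by simp [h6]
    simp only [List.all_nil, Bool.true_and, hcong, h2, Bool.and_true]
  · rw [if_pos (by omega)]
    have h2 : ((0 : Nat) + List.count '-' s.toList == 5) = false := by
      simp; omega
    simp only [h2, Bool.and_false]
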